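-- pv_equiv track=rewrite | github.com/Domben93/PMSEsegmentation | pca_data_analysis.py | generate_names
-- ===== SOURCE A (Python) =====
-- def generate_names(data_info):
--     enumerated_img_list = []
--     img_num = 1
--     sub_img = 1
--
--     for num, info in enumerate(data_info['image_name']):
--         if num == 0:
--             enumerated_img_list.append(str(img_num) + '-' + str(sub_img))
--             last_info = info
--         else:
--             if info != last_info:
--                 sub_img = 1
--                 img_num += 1
--             else:
--                 sub_img += 1
--
--             enumerated_img_list.append(str(img_num) + '-' + str(sub_img))
--         last_info = info
--
--     return enumerated_img_list
-- ===== SOURCE B (Python) =====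
-- def generate_names(data_info):
--     names = data_info['image_name']
--     # collect consecutive runs of equal names as (name, count) groups
--     groups = []
--     for n in names:
--         if groups and groups[-1][0] == n:
--             groups[-1][1] += 1
--         else:
--             groups.append([n, 1])
--     return [str(g) + '-' + str(p)
--             for g, (_, cnt) in enumerate(groups, 1)
--             for p in range(1, cnt + 1)]
-- ===== Notes on version B (the rewrite author's own statement) =====
-- stated objective: idiomatic
-- what changed: Replaces the last_info/img_num/sub_img state machine with a group-then-enumerate structure: consecutive runs are collected as (name, count) groups once, then the names are produced by a nested comprehension over group index and position within the group.
import Mathlib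
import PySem

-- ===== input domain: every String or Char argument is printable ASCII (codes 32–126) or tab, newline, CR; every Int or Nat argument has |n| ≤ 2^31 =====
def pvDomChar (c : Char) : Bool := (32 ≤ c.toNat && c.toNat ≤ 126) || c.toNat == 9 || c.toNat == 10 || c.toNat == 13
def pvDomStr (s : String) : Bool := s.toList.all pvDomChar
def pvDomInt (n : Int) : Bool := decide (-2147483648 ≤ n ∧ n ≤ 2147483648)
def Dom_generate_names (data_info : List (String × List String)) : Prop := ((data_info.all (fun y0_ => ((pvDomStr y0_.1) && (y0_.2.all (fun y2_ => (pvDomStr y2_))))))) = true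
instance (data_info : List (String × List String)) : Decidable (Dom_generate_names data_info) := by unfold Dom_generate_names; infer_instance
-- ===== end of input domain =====

-- B replaces A's last_info/img_num/sub_img state machine by collecting consecutive
-- runs as (name, count) groups and enumerating groups and in-group positions (idiomatic).

-- ===== PORT A =====
-- A's loop body: state = (result list, img_num, sub_img, last_info), item = (num, info).
def stepA (st : List String × Int × Int × String) (p : Int × String) : List String × Int × Int × String :=
  let (lst, img_num, sub_img, last_info) := st
  let (num, info) := p
  if num == 0 then
    (lst ++ [PySem.Int.toStr img_num ++ "-" ++ PySem.Int.toStr sub_img], img_num, sub_img, info)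
  else if info != last_info then
    (lst ++ [PySem.Int.toStr (img_num + 1) ++ "-" ++ PySem.Int.toStr 1], img_num + 1, 1, info)
  else
    (lst ++ [PySem.Int.toStr img_num ++ "-" ++ PySem.Int.toStr (sub_img + 1)], img_num, sub_img + 1, info)

def generate_names (data_info : List (String × List String)) : List String :=
  let names := (data_info.lookup "image_name").getD []
  ((PySem.List.enumerate names).foldl stepA ([], 1, 1, "")).1

-- ===== PORT B =====
-- Source B's grouping loop: append-at-end, bumping the count of the last group when equal.
def stepB (groups : List (String × Int)) (n : String) : List (String × Int) :=
  match groups.getLast? with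
  | some (m, c) => if m == n then groups.dropLast ++ [(m, c + 1)] else groups ++ [(n, 1)]
  | none => groups ++ [(n, 1)]

def generate_names_alt (data_info : List (String × List String)) : List String :=
  let names := (data_info.lookup "image_name").getD []
  let groups := names.foldl stepB []
  (PySem.List.enumerate groups 1).flatMap
    (fun gp => (PySem.List.pyRange 1 (gp.2.2 + 1) 1).map
      (fun p => PySem.Int.toStr gp.1 ++ "-" ++ PySem.Int.toStr p))

-- ===== PRECONDITION & SPEC =====
-- Pre_ excludes exactly the inputs where Python A raises KeyError ('image_name' key missing).
def Pre_generate_names (data_info : List (String × List String)) : Prop :=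
  "image_name" ∈ data_info.map Prod.fst
instance (data_info : List (String × List String)) : Decidable (Pre_generate_names data_info) := by unfold Pre_generate_names; infer_instance

def pvWitness_generate_names : (List (String × List String)) :=
  [("image_name", ["a", "a", "b", "a"])]

def Spec_generate_names (data_info : List (String × List String)) (out : List String) : Prop := out = generate_names_alt data_info
instance (data_info : List (String × List String)) (out : List String) : Decidable (Spec_generate_names data_info out) := by unfold Spec_generate_names; infer_instance

-- ===== CLAIM (what is proved, stated in full; the proofs are below) =====
def Claim_equal_generate_names : Prop := ∀ (data_info : List (String × List String)), Dom_generate_names data_info → Pre_generate_names data_info → Spec_generate_names data_info (generate_names data_info)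

-- ===== LEMMAS AND PROOFS =====

-- A's loop after the first element, modelled recursively.
def goA : List String → Int → Int → String → List String
  | [], _, _, _ => []
  | n :: ns, img, sub, last =>
    if n != last then
      (PySem.Int.toStr (img + 1) ++ "-" ++ PySem.Int.toStr 1) :: goA ns (img + 1) 1 n
    else
      (PySem.Int.toStr img ++ "-" ++ PySem.Int.toStr (sub + 1)) :: goA ns img (sub + 1) n

-- B's groups after the first element, modelled recursively (front grouping).
def groupsFrom : String → Int → List String → List (String × Int)
  | last, c, [] => [(last, c)]
  | last, c, n :: ns =>
    if last == n then groupsFrom last (c + 1) ns else (last, c) :: groupsFrom n 1 ns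

def fmt (g p : Int) : String := PySem.Int.toStr g ++ "-" ++ PySem.Int.toStr p

def renderF (gp : Int × String × Int) : List String :=
  (PySem.List.pyRange 1 (gp.2.2 + 1) 1).map (fun p => fmt gp.1 p)

theorem lemA (ns : List String) : ∀ (s : Int), 1 ≤ s → ∀ (lst : List String) (img sub : Int) (last : String),
    ((PySem.List.enumerate ns s).foldl stepA (lst, img, sub, last)).1 = lst ++ goA ns img sub last := by
  induction ns with
  | nil => intro s hs lst img sub last; simp [PySem.List.enumerate_nil, goA]
  | cons n ns ih =>
    intro s hs lst img sub last
    rw [PySem.List.enumerate_cons, List.foldl_cons]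
    have hs0 : (s == 0) = false := by simp; omega
    by_cases h : (n != last) = true
    · rw [show stepA (lst, img, sub, last) (s, n)
          = (lst ++ [PySem.Int.toStr (img + 1) ++ "-" ++ PySem.Int.toStr 1], img + 1, 1, n) by
        simp [stepA, hs0, h]]
      rw [ih (s + 1) (by omega), goA, if_pos h, List.append_assoc]
      simp
    · rw [show stepA (lst, img, sub, last) (s, n)
          = (lst ++ [PySem.Int.toStr img ++ "-" ++ PySem.Int.toStr (sub + 1)], img, sub + 1, n) by
        simp [stepA, hs0]; simp at h; simp [h]]
      rw [ih (s + 1) (by omega), goA, if_neg h, List.append_assoc]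
      simp

theorem lemB (ns : List String) : ∀ (acc : List (String × Int)) (last : String) (c : Int),
    ns.foldl stepB (acc ++ [(last, c)]) = acc ++ groupsFrom last c ns := by
  induction ns with
  | nil => intro acc last c; simp [groupsFrom]
  | cons n ns ih =>
    intro acc last c
    rw [List.foldl_cons]
    by_cases h : (last == n) = true
    · rw [show stepB (acc ++ [(last, c)]) n = acc ++ [(last, c + 1)] by
        simp [stepB, List.getLast?_concat, h]]
      rw [ih acc last (c + 1), groupsFrom, if_pos h]
    · rw [show stepB (acc ++ [(last, c)]) n = (acc ++ [(last, c)]) ++ [(n, 1)] by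
        simp [stepB, List.getLast?_concat, h]]
      rw [ih (acc ++ [(last, c)]) n 1, groupsFrom, if_neg h, List.append_assoc]
      simp

theorem lemC (ns : List String) : ∀ (last : String) (c g : Int), 1 ≤ c →
    (PySem.List.enumerate (groupsFrom last c ns) g).flatMap renderF
      = (PySem.List.pyRange 1 (c + 1) 1).map (fun p => fmt g p) ++ goA ns g c last := by
  induction ns with
  | nil =>
    intro last c g hc
    simp [groupsFrom, PySem.List.enumerate_cons, PySem.List.enumerate_nil, goA, renderF]
  | cons n ns ih =>
    intro last c g hc
    by_cases h : (last == n) = true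
    · rw [groupsFrom, if_pos h, ih last (c + 1) g (by omega)]
      have hn : n = last := (LawfulBEq.eq_of_beq h).symm
      rw [goA, if_neg (by simp [hn]), PySem.List.pyRange_one_succ_right (by omega : (1:Int) ≤ c + 1)]
      simp [hn, fmt, List.append_assoc]
    · rw [groupsFrom, if_neg h, PySem.List.enumerate_cons, List.flatMap_cons,
          ih n 1 (g + 1) (by omega), goA, if_pos (by simp at h ⊢; exact fun e => h e.symm)]
      have h2 : PySem.List.pyRange 1 (1 + 1) 1 = [(1 : Int)] := PySem.List.pyRange_one_singleton 1
      rw [h2]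
      simp [renderF, fmt, List.append_assoc]

theorem core_eq (names : List String) :
    ((PySem.List.enumerate names).foldl stepA ([], 1, 1, "")).1
      = (PySem.List.enumerate (names.foldl stepB []) 1).flatMap
          (fun gp => (PySem.List.pyRange 1 (gp.2.2 + 1) 1).map
            (fun p => PySem.Int.toStr gp.1 ++ "-" ++ PySem.Int.toStr p)) := by
  cases names with
  | nil => simp [PySem.List.enumerate_nil]
  | cons n ns =>
    rw [PySem.List.enumerate_cons, List.foldl_cons]
    rw [show stepA ([], 1, 1, "") (0, n)
        = ([PySem.Int.toStr 1 ++ "-" ++ PySem.Int.toStr 1], 1, 1, n) by simp [stepA]]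
    rw [show (0:Int)+1 = 1 by norm_num, lemA ns 1 (by omega)]
    rw [List.foldl_cons,
        show stepB [] n = [] ++ [(n, 1)] by simp [stepB],
        lemB ns [] n 1, List.nil_append]
    have hr : (PySem.List.enumerate (groupsFrom n 1 ns) 1).flatMap
        (fun gp => (PySem.List.pyRange 1 (gp.2.2 + 1) 1).map
          (fun p => PySem.Int.toStr gp.1 ++ "-" ++ PySem.Int.toStr p))
        = (PySem.List.enumerate (groupsFrom n 1 ns) 1).flatMap renderF := rfl
    rw [hr, lemC ns n 1 1 (by omega), PySem.List.pyRange_one_singleton]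
    simp [fmt]

-- ===== VERDICT (by name: the statement is the Claim_ definition above) =====
theorem generate_names_spec : Claim_equal_generate_names := by
  intro data_info _ _
  unfold Spec_generate_names generate_names generate_names_alt
  exact core_eq _
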